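-- pv_equiv track=rewrite | github.com/licharrui/python_base | leet_code/day1/diff_triple_nums.py | get_diff_triple_nums
-- ===== SOURCE A (Python) =====
-- def get_diff_triple_nums(nums):
--     triples = []
--     for index in range(len(nums)):
--         for index2 in range(index + 1, len(nums)):
--             for index3 in range(index2 + 1, len(nums)):
--                 if len(set([nums[index], nums[index2], nums[index3]])) == 3:
--                     triples.append(tuple([index, index2, index3]))
--     return len(triples)
-- ===== SOURCE B (Python) =====
-- def get_diff_triple_nums(nums):
--     # One left-to-right pass: when element x arrives after a prefix of length k
--     # containing c copies of x, the new distinct triples ending at x are the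
--     # distinct-value pairs in the prefix that avoid x: pairs - c*(k-c).
--     total = 0
--     pairs = 0  # number of index pairs i<j in the prefix with nums[i] != nums[j]
--     counts = {}
--     k = 0
--     for x in nums:
--         c = counts.get(x, 0)
--         total += pairs - c * (k - c)
--         pairs += k - c
--         counts[x] = c + 1
--         k += 1
--     return total
-- ===== Notes on version B (the rewrite author's own statement) =====
-- stated objective: faster
-- what changed: Replaces the O(n^3) triple index loop with a single left-to-right pass that maintains a value-frequency dict and the running count of distinct-value index pairs, adding pairs - c*(k-c) new triples per element.
import Mathlib
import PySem

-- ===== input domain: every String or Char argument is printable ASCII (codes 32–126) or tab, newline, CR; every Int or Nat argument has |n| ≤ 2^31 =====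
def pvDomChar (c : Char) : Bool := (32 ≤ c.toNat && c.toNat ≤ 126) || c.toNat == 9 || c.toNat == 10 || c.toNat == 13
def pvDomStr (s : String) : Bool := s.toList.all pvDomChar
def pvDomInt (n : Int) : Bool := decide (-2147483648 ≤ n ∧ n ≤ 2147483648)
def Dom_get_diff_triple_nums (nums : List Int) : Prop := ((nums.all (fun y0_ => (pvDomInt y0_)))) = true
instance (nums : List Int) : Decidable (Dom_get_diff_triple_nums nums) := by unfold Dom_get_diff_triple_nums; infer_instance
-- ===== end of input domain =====

-- B replaces A's O(n^3) index triple loop by one left-to-right pass that keeps a value-frequency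
-- dict and the number of distinct-value index pairs seen so far (objective: faster, asymptotic).

-- ===== PORT A =====
def get_diff_triple_nums (nums : List Int) : Int :=
  -- triples = []; for index in range(len(nums)): for index2 ...: for index3 ...:
  --   if len(set([nums[index], nums[index2], nums[index3]])) == 3: triples.append(...)
  -- return len(triples)
  -- (all three indices are always in range, so nums[i] is ported as pyGetD with an unused default)
  let n : Int := (nums.length : Int)
  let triples : List (Int × Int × Int) :=
    (PySem.List.pyRange 0 n).foldl (fun acc index =>
      (PySem.List.pyRange (index + 1) n).foldl (fun acc2 index2 =>
        (PySem.List.pyRange (index2 + 1) n).foldl (fun acc3 index3 =>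
          if (PySem.Set.ofList [PySem.List.pyGetD nums index 0,
                PySem.List.pyGetD nums index2 0,
                PySem.List.pyGetD nums index3 0]).length = 3
          then acc3 ++ [(index, index2, index3)] else acc3) acc2) acc) []
  (triples.length : Int)

-- ===== PORT B =====
def get_diff_triple_nums_alt (nums : List Int) : Int :=
  -- state = (total, pairs, counts, k); one pass over nums
  (nums.foldl (fun (st : Int × Int × PySem.Dict Int Int × Int) x =>
      let c := st.2.2.1.getD x 0
      (st.1 + (st.2.1 - c * (st.2.2.2 - c)),
       st.2.1 + (st.2.2.2 - c),
       st.2.2.1.insert x (c + 1),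
       st.2.2.2 + 1))
    (0, 0, PySem.Dict.empty, 0)).1

-- ===== PRECONDITION & SPEC =====
def Spec_get_diff_triple_nums (nums : List Int) (out : Int) : Prop := out = get_diff_triple_nums_alt nums
instance (nums : List Int) (out : Int) : Decidable (Spec_get_diff_triple_nums nums out) := by unfold Spec_get_diff_triple_nums; infer_instance

-- ===== CLAIM (what is proved, stated in full; the proofs are below) =====
def Claim_equal_get_diff_triple_nums : Prop := ∀ (nums : List Int), Dom_get_diff_triple_nums nums → Spec_get_diff_triple_nums nums (get_diff_triple_nums nums)

-- ===== LEMMAS AND PROOFS =====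

def pvNe (x : Int) : Int → Bool := fun z => !decide (z = x)
def pvNe2 (x y : Int) : Int → Bool := fun z => !decide (z = x) && !decide (z = y)
def pvQ2 (x : Int) : List Int → Nat
  | [] => 0
  | y :: ys => (if x = y then 0 else ys.countP (pvNe2 x y)) + pvQ2 x ys
def pvT3 : List Int → Nat
  | [] => 0
  | x :: xs => pvQ2 x xs + pvT3 xs
def pvP2 : List Int → Nat
  | [] => 0
  | x :: xs => xs.countP (pvNe x) + pvP2 xs

lemma pvNe2_symm (x y : Int) : pvNe2 x y = pvNe2 y x := by
  funext z; simp [pvNe2, Bool.and_comm]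

lemma pv_countP_ne_add_count (l : List Int) (x : Int) :
    l.countP (pvNe x) + l.count x = l.length := by
  induction l with
  | nil => simp
  | cons y ys ih =>
    simp only [List.countP_cons, List.count_cons, pvNe] at ih ⊢
    by_cases h1 : y = x <;> simp [h1] <;> omega

lemma pv_countP_split (l : List Int) (x z : Int) (h : x ≠ z) :
    l.countP (pvNe x) = l.countP (pvNe2 x z) + l.count z := by
  induction l with
  | nil => simp
  | cons y ys ih =>
    simp only [List.countP_cons, List.count_cons, pvNe, pvNe2] at ih ⊢
    by_cases h1 : y = x <;> by_cases h2 : y = z <;>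
      simp [h1, h2, h, Ne.symm h] <;> omega

lemma pvQ2_append (x z : Int) (l : List Int) :
    pvQ2 x (l ++ [z]) = pvQ2 x l + (if x = z then 0 else l.countP (pvNe2 x z)) := by
  induction l with
  | nil => simp [pvQ2]
  | cons y ys ih =>
    simp only [List.cons_append, pvQ2, List.countP_append, List.countP_cons, List.countP_nil, ih]
    rcases eq_or_ne x y with h1 | h1
    · subst h1
      rcases eq_or_ne x z with h2 | h2
      · subst h2; simp
      · simp [pvNe2, h2]
    · rcases eq_or_ne x z with h2 | h2
      · subst h2
        simp [pvNe2, h1]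
      · rcases eq_or_ne y z with h3 | h3
        · subst h3
          simp [pvNe2, h1, Ne.symm h1]; omega
        · simp [pvNe2, h1, Ne.symm h1, h2, Ne.symm h2, h3, Ne.symm h3]; omega

lemma pvT3_append (z : Int) (l : List Int) :
    pvT3 (l ++ [z]) = pvT3 l + pvQ2 z l := by
  induction l with
  | nil => simp [pvT3, pvQ2]
  | cons y ys ih =>
    simp only [List.cons_append, pvT3, pvQ2, ih, pvQ2_append, pvNe2_symm y z]
    rcases eq_or_ne y z with h1 | h1
    · subst h1; simp; omega
    · rw [pvNe2_symm z y]; simp [h1, Ne.symm h1]; omega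

lemma pvP2_append (z : Int) (l : List Int) :
    pvP2 (l ++ [z]) = pvP2 l + l.countP (pvNe z) := by
  induction l with
  | nil => simp [pvP2]
  | cons y ys ih =>
    simp only [List.cons_append, pvP2, ih, List.countP_append, List.countP_cons, List.countP_nil]
    rcases eq_or_ne y z with h1 | h1
    · subst h1; simp [pvNe]; omega
    · simp [pvNe, h1, Ne.symm h1]; omega

lemma pvP2_eq_q2 (x : Int) (l : List Int) :
    (pvP2 l : Int) = (pvQ2 x l : Int) + (l.count x : Int) * ((l.length : Int) - (l.count x : Int)) := by
  induction l with
  | nil => simp [pvP2, pvQ2]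
  | cons y ys ih =>
    simp only [pvP2, pvQ2, List.count_cons, List.length_cons]
    have hc := pv_countP_ne_add_count ys x
    rcases eq_or_ne y x with h1 | h1
    · subst h1
      simp only [beq_self_eq_true, if_true]
      have hcy := pv_countP_ne_add_count ys y
      push_cast
      nlinarith [ih, hcy]
    · have hsplit := pv_countP_split ys y x h1
      rw [pvNe2_symm y x] at hsplit
      simp only [if_neg (Ne.symm h1), beq_iff_eq, if_neg h1]
      have hsplit' : (ys.countP (pvNe y) : Int) = ys.countP (pvNe2 x y) + ys.count x := by
        exact_mod_cast congrArg (Nat.cast : Nat → Int) hsplit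
      push_cast
      nlinarith [ih, hsplit', hc]

def pvStep (st : Int × Int × PySem.Dict Int Int × Int) (x : Int) :
    Int × Int × PySem.Dict Int Int × Int :=
  let c := st.2.2.1.getD x 0
  (st.1 + (st.2.1 - c * (st.2.2.2 - c)),
   st.2.1 + (st.2.2.2 - c),
   st.2.2.1.insert x (c + 1),
   st.2.2.2 + 1)

lemma pv_b_loop (l : List Int) : ∀ (p : List Int),
    l.foldl pvStep ((pvT3 p : Int), (pvP2 p : Int), PySem.Dict.counter p, (p.length : Int))
    = ((pvT3 (p ++ l) : Int), (pvP2 (p ++ l) : Int), PySem.Dict.counter (p ++ l), ((p ++ l).length : Int)) := by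
  induction l with
  | nil => intro p; simp
  | cons x l' ih =>
    intro p
    have h1 : (pvT3 p : Int) + ((pvP2 p : Int) - (p.count x : Int) * ((p.length : Int) - (p.count x : Int)))
        = (pvT3 (p ++ [x]) : Int) := by
      rw [pvT3_append]; have := pvP2_eq_q2 x p; push_cast at this ⊢; linarith
    have h2 : (pvP2 p : Int) + ((p.length : Int) - (p.count x : Int)) = (pvP2 (p ++ [x]) : Int) := by
      rw [pvP2_append]; have := pv_countP_ne_add_count p x; push_cast [← this]; ring
    have h3 : (PySem.Dict.counter p).insert x ((p.count x : Int) + 1)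
        = PySem.Dict.counter (p ++ [x]) := by
      have hc := PySem.Dict.getD_counter p x
      rw [← hc, ← PySem.Dict.foldl_insert_getD_add_one_eq_counter p,
          ← PySem.Dict.foldl_insert_getD_add_one_eq_counter (p ++ [x]), List.foldl_append]
      rfl
    have h4 : (p.length : Int) + 1 = ((p ++ [x]).length : Int) := by simp
    have hstate : pvStep ((pvT3 p : Int), (pvP2 p : Int), PySem.Dict.counter p, (p.length : Int)) x
        = ((pvT3 (p ++ [x]) : Int), (pvP2 (p ++ [x]) : Int), PySem.Dict.counter (p ++ [x]), ((p ++ [x]).length : Int)) := by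
      simp only [pvStep, PySem.Dict.getD_counter]
      rw [h1, h2, h3, h4]
    rw [List.foldl_cons, hstate]
    have := ih (p ++ [x])
    simpa [List.append_assoc] using this

lemma pv_alt_eq (nums : List Int) : get_diff_triple_nums_alt nums = (pvT3 nums : Int) := by
  have h : get_diff_triple_nums_alt nums = (nums.foldl pvStep
      ((pvT3 ([] : List Int) : Int), (pvP2 ([] : List Int) : Int),
        PySem.Dict.counter ([] : List Int), (([] : List Int).length : Int))).1 := rfl
  rw [h, pv_b_loop nums []]
  simp

-- ---- A side ----

def pvC3 (a b : Int) : Int → Bool := fun w => !decide (a = b) && pvNe2 a b w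

def pvF3 (l : List Int) (a b : Int) (j : Int) : Nat :=
  ((PySem.List.pyRange (j + 1) (l.length : Int)).filter
    (fun k => pvC3 a b (PySem.List.pyGetD l k 0))).length

def pvF2 (l : List Int) (a : Int) (i : Int) : Nat :=
  ((PySem.List.pyRange (i + 1) (l.length : Int)).map
    (fun j => pvF3 l a (PySem.List.pyGetD l j 0) j)).sum

lemma pv_cond_eq (a b c : Int) :
    (decide ((PySem.Set.ofList [a, b, c]).length = 3)) = pvC3 a b c := by
  have h : PySem.Set.ofList [a, b, c] = ((PySem.Set.add (PySem.Set.add (PySem.Set.add [] a) b) c)) := rfl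
  rcases eq_or_ne a b with h1 | h1
  · subst h1
    rcases eq_or_ne a c with h2 | h2
    · subst h2; simp [pvC3, pvNe2, h]
    · simp [pvC3, pvNe2, h, Ne.symm h2]
  · rcases eq_or_ne a c with h2 | h2
    · subst h2
      simp [pvC3, pvNe2, h, h1, Ne.symm h1]
    · rcases eq_or_ne b c with h3 | h3
      · subst h3
        simp [pvC3, pvNe2, h, h1, Ne.symm h1]
      · simp [pvC3, pvNe2, h, h1, Ne.symm h1, Ne.symm h2, Ne.symm h3]

lemma pv_getD_append_head (p t : List Int) (z : Int) :
    PySem.List.pyGetD (p ++ z :: t) ((p.length : Nat) : Int) 0 = z := by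
  rw [PySem.List.pyGetD_natCast, List.getD_eq_getElem?_getD,
      List.getElem?_append_right (le_refl p.length)]
  simp

lemma pv_inner (f : Int → Bool) : ∀ (t p : List Int),
    ((PySem.List.pyRange ((p.length : Nat) : Int) (((p ++ t).length : Nat) : Int)).filter
      (fun k => f (PySem.List.pyGetD (p ++ t) k 0))).length = t.countP f := by
  intro t
  induction t with
  | nil => intro p; simp
  | cons z t' ih =>
    intro p
    have hlt : ((p.length : Nat) : Int) < (((p ++ z :: t').length : Nat) : Int) := by
      simp
    rw [PySem.List.pyRange_one_cons hlt, List.filter_cons]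
    have hz := pv_getD_append_head p t' z
    have harg : ((p.length : Nat) : Int) + 1 = (((p ++ [z]).length : Nat) : Int) := by
      simp
    have hl : (p ++ [z]) ++ t' = p ++ z :: t' := by simp
    have := ih (p ++ [z])
    rw [hl] at this
    rw [hz, harg]
    by_cases hf : f z
    · rw [if_pos hf, List.length_cons, this, List.countP_cons, hf]
      simp
    · rw [if_neg (by simp [hf]), this, List.countP_cons]
      simp [hf]

lemma pv_countP_C3 (a z : Int) (t : List Int) :
    t.countP (pvC3 a z) = if a = z then 0 else t.countP (pvNe2 a z) := by
  rcases eq_or_ne a z with h | h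
  · subst h; simp [pvC3]
  · rw [if_neg h]
    exact List.countP_congr (fun w _ => by simp [pvC3, h])

lemma pvF3_head (a z : Int) (p t' : List Int) :
    pvF3 (p ++ z :: t') a z ((p.length : Nat) : Int) = t'.countP (pvC3 a z) := by
  unfold pvF3
  have harg : ((p.length : Nat) : Int) + 1 = (((p ++ [z]).length : Nat) : Int) := by
    simp
  have hl : (p ++ [z]) ++ t' = p ++ z :: t' := by simp
  have := pv_inner (fun w => pvC3 a z w) t' (p ++ [z])
  rw [hl] at this
  rw [harg]
  exact this

lemma pv_mid (a : Int) : ∀ (t p : List Int),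
    ((PySem.List.pyRange ((p.length : Nat) : Int) (((p ++ t).length : Nat) : Int)).map
      (fun j => pvF3 (p ++ t) a (PySem.List.pyGetD (p ++ t) j 0) j)).sum = pvQ2 a t := by
  intro t
  induction t with
  | nil => intro p; simp [pvQ2]
  | cons z t' ih =>
    intro p
    have hlt : ((p.length : Nat) : Int) < (((p ++ z :: t').length : Nat) : Int) := by
      simp
    rw [PySem.List.pyRange_one_cons hlt, List.map_cons, List.sum_cons,
        pv_getD_append_head p t' z, pvF3_head]
    have harg : ((p.length : Nat) : Int) + 1 = (((p ++ [z]).length : Nat) : Int) := by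
      simp
    have hl : (p ++ [z]) ++ t' = p ++ z :: t' := by simp
    have := ih (p ++ [z])
    rw [hl] at this
    rw [harg, this, pv_countP_C3]
    simp [pvQ2]

lemma pvF2_head (z : Int) (p t' : List Int) :
    pvF2 (p ++ z :: t') z ((p.length : Nat) : Int) = pvQ2 z t' := by
  unfold pvF2
  have harg : ((p.length : Nat) : Int) + 1 = (((p ++ [z]).length : Nat) : Int) := by
    simp
  have hl : (p ++ [z]) ++ t' = p ++ z :: t' := by simp
  have := pv_mid z t' (p ++ [z])
  rw [hl] at this
  rw [harg]
  exact this

lemma pv_outer : ∀ (t p : List Int),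
    ((PySem.List.pyRange ((p.length : Nat) : Int) (((p ++ t).length : Nat) : Int)).map
      (fun i => pvF2 (p ++ t) (PySem.List.pyGetD (p ++ t) i 0) i)).sum = pvT3 t := by
  intro t
  induction t with
  | nil => intro p; simp [pvT3]
  | cons z t' ih =>
    intro p
    have hlt : ((p.length : Nat) : Int) < (((p ++ z :: t').length : Nat) : Int) := by
      simp
    rw [PySem.List.pyRange_one_cons hlt, List.map_cons, List.sum_cons,
        pv_getD_append_head p t' z, pvF2_head]
    have harg : ((p.length : Nat) : Int) + 1 = (((p ++ [z]).length : Nat) : Int) := by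
      simp
    have hl : (p ++ [z]) ++ t' = p ++ z :: t' := by simp
    have := ih (p ++ [z])
    rw [hl] at this
    rw [harg, this]
    simp [pvT3]

lemma pv_a_eq (nums : List Int) : get_diff_triple_nums nums = (pvT3 nums : Int) := by
  unfold get_diff_triple_nums
  simp only [PySem.List.foldl_append_ite, PySem.List.foldl_append_eq_flatMap,
    List.nil_append, List.length_flatMap, List.length_map]
  have h := pv_outer nums []
  simp only [pvF2, pvF3, List.nil_append, List.length_nil, Nat.cast_zero] at h
  simp only [pv_cond_eq]
  rw [← h]

-- ===== VERDICT (by name: the statement is the Claim_ definition above) =====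
theorem get_diff_triple_nums_spec : Claim_equal_get_diff_triple_nums := by
  intro nums _
  unfold Spec_get_diff_triple_nums
  rw [pv_a_eq, pv_alt_eq]
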